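-- pv_equiv track=rewrite | github.com/UKPLab/emnlp2023-learning-from-free-text-human-feedback | code/automatic_filtering/src/processors/utils.py | chunk_pairing
-- ===== SOURCE A (Python) =====
-- from typing import List, Tuple, Dict
--
-- def chunk_pairing(phrase:str, utterance:str) ->List[Tuple[str, str]]:
--     '''
--         This method implements a simple pairing algorithm:
--             (1) The number of words n in the phrase are evaluated (when
--                 splitted by a whitespace).
--             (2) The utterance is splitted by the white space.
--             (3) Overlapping chunks of size n are built from the original
--                 utterance (with n - (n - 1) overlapping token). E.g.: n = 2;
--                 utterance = "This is a test" ->["This is", "is a", "a test"]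
--             (4) The phrase is paired with each of the chunks and this is
--                 returned as list.
--         :param phrase: The phrase.
--         :param utterance: The utterance to chunk.
--         :return: List of Tuples of the form (phrase, chunk of utterance)
--     '''
--     n = len(phrase.split(' '))
--     _utterance = utterance.split(' ')
--     chunks = [' '.join(_utterance[i:i+n])
--         for i in range(0, len(_utterance), n - (n - 1))
--         if len(_utterance[i:i+n]) == n]
--     pairs = [(phrase.lower(), chunk.lower()) for chunk in chunks]
--
--     return pairs
-- ===== SOURCE B (Python) =====
-- def chunk_pairing(phrase, utterance):
--     n = len(phrase.split(' '))
--     words = utterance.split(' ')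
--     p = phrase.lower()
--     pairs = []
--     while len(words) >= n:
--         pairs.append((p, ' '.join(words[:n]).lower()))
--         words = words[1:]
--     return pairs
-- ===== Notes on version B (the rewrite author's own statement) =====
-- stated objective: simpler
-- what changed: A's index-range comprehension with a full-window length filter plus a second pairing pass is replaced by a single peel loop that, while at least n words remain, emits (lowered phrase, lowered join of the first n words) and drops the head word, lowercasing the phrase once.
import Mathlib
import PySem

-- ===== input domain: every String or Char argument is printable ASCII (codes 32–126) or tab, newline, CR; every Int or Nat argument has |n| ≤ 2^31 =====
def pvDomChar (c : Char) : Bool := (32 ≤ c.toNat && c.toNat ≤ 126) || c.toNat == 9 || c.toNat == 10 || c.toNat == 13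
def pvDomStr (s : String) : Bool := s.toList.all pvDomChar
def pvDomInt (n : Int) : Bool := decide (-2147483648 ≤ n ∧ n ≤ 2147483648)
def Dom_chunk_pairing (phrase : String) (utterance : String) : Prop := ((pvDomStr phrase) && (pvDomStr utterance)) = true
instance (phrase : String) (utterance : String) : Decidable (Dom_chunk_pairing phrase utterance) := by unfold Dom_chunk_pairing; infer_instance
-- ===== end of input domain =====

-- B replaces A's index-range comprehension (with its full-window length filter) and second
-- pairing pass by a single peel loop that emits the first n-word window while enough words
-- remain, lowercasing the phrase once; objective: simpler.

-- ===== PORT A =====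
def chunk_pairing (phrase : String) (utterance : String) : List (String × String) :=
  let n : Int := ((PySem.Str.split? phrase " ").getD []).length
  let us := (PySem.Str.split? utterance " ").getD []
  let chunks := (PySem.List.pyRange 0 us.length (n - (n - 1))).foldl
    (fun acc i =>
      if (((PySem.List.slice us (some i) (some (i + n))).length : Int) == n) = true
      then acc ++ [PySem.Str.join " " (PySem.List.slice us (some i) (some (i + n)))]
      else acc) []
  chunks.map (fun chunk => (PySem.Str.lower phrase, PySem.Str.lower chunk))

-- ===== PORT B =====
-- the while loop 'while len(words) >= n: append pair; words = words[1:]' as structural recursion on words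
def chunkLoop (p : String) (n : Nat) : List String → List (String × String)
  | [] => []
  | w :: ws =>
    if n ≤ (w :: ws).length then
      (p, PySem.Str.lower (PySem.Str.join " " (List.take n (w :: ws)))) :: chunkLoop p n ws
    else []

def chunk_pairing_alt (phrase : String) (utterance : String) : List (String × String) :=
  let n : Nat := ((PySem.Str.split? phrase " ").getD []).length
  let words := (PySem.Str.split? utterance " ").getD []
  chunkLoop (PySem.Str.lower phrase) n words

-- ===== PRECONDITION & SPEC =====
def Spec_chunk_pairing (phrase : String) (utterance : String) (out : List (String × String)) : Prop := out = chunk_pairing_alt phrase utterance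
instance (phrase : String) (utterance : String) (out : List (String × String)) : Decidable (Spec_chunk_pairing phrase utterance out) := by unfold Spec_chunk_pairing; infer_instance

-- ===== CLAIM (what is proved, stated in full; the proofs are below) =====
def Claim_equal_chunk_pairing : Prop := ∀ (phrase : String) (utterance : String), Dom_chunk_pairing phrase utterance → Spec_chunk_pairing phrase utterance (chunk_pairing phrase utterance)

-- ===== LEMMAS AND PROOFS =====

-- the indices of range L that survive A's full-window filter form an initial segment
theorem pv_filter_range (n M : Nat) : ∀ (L : Nat),
    (List.range L).filter (fun k => decide (k + n ≤ M)) = List.range (min L (M + 1 - n)) := by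
  intro L
  induction L with
  | zero => simp
  | succ L ih =>
    rw [List.range_succ, List.filter_append, ih]
    by_cases h : L + n ≤ M
    · have h1 : min L (M + 1 - n) = L := by omega
      have h2 : min (L + 1) (M + 1 - n) = L + 1 := by omega
      simp [h, h1, h2, List.range_succ]
    · have h2 : min (L + 1) (M + 1 - n) = min L (M + 1 - n) := by omega
      simp [h, h2]

-- B's peel loop produces exactly the full windows, indexed from 0
theorem pv_chunkLoop_eq (p : String) (n : Nat) : ∀ (ws : List String),
    chunkLoop p n ws = (List.range (min ws.length (ws.length + 1 - n))).map
      (fun k => (p, PySem.Str.lower (PySem.Str.join " " (List.take n (List.drop k ws))))) := by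
  intro ws
  induction ws with
  | nil => simp [chunkLoop]
  | cons w ws ih =>
    by_cases h : n ≤ (w :: ws).length
    · have hm : min (w :: ws).length ((w :: ws).length + 1 - n)
          = (min ws.length (ws.length + 1 - n)) + 1 := by
        simp only [List.length_cons] at *; omega
      rw [chunkLoop, if_pos h, hm, List.range_succ_eq_map, List.map_cons, List.map_map, ih]
      simp [Function.comp_def]
    · have hm : min (w :: ws).length ((w :: ws).length + 1 - n) = 0 := by
        simp only [List.length_cons] at *; omega
      rw [chunkLoop, if_neg h, hm]
      simp

-- ===== VERDICT (by name: the statement is the Claim_ definition above) =====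
theorem chunk_pairing_spec : Claim_equal_chunk_pairing := by
  intro phrase utterance _
  unfold Spec_chunk_pairing
  simp only [chunk_pairing, chunk_pairing_alt]
  set nN : Nat := ((PySem.Str.split? phrase " ").getD []).length with hn
  set us : List String := (PySem.Str.split? utterance " ").getD [] with hus
  have hstep : ((nN : Int) - ((nN : Int) - 1)) = 1 := by ring
  rw [hstep, PySem.List.pyRange_one, List.foldl_map]
  have hsl : ∀ k : Nat, PySem.List.slice us (some ((0 : Int) + (k : Int))) (some ((0 : Int) + (k : Int) + (nN : Int)))
      = List.take nN (List.drop k us) := by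
    intro k
    have := PySem.List.slice_natCast_add us k nN
    simpa using this
  have hL : ((us.length : Int) - 0).toNat = us.length := by omega
  rw [hL]
  simp only [hsl]
  rw [PySem.List.foldl_append_if
      (fun k => (((List.take nN (List.drop k us)).length : Int) == (nN:Int)))
      (fun k => PySem.Str.join " " (List.take nN (List.drop k us))) (List.range us.length) [],
    List.nil_append]
  have hcond : (List.range us.length).filter
      (fun k => (((List.take nN (List.drop k us)).length : Int) == (nN:Int)))
      = (List.range us.length).filter (fun k => decide (k + nN ≤ us.length)) := by
    apply List.filter_congr
    intro k hk
    simp only [List.mem_range] at hk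
    rw [Bool.eq_iff_iff, beq_iff_eq, decide_eq_true_eq]
    simp only [List.length_take, List.length_drop, Nat.cast_inj]
    omega
  rw [hcond, pv_filter_range, List.map_map, pv_chunkLoop_eq]
  simp [Function.comp_def]
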